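-- pv_equiv track=rewrite | github.com/pypi-data/pypi-mirror-397 | packages/rbceq2/rbceq2-2.4.1.tar.gz/rbceq2-2.4.1/src/rbceq2/phenotype/choose_pheno.py | combine_expressions
-- ===== SOURCE A (Python) =====
-- from collections import Counter, defaultdict
--
-- def combine_expressions(components: list[str]) -> str:
--     """
--     Combines multiple expressions with the same prefix into a single expression.
--
--     This function takes a string containing multiple expressions separated by commas,
--     where each expression has the same prefix (e.g., 'In', 'LW', 'Tc') followed by
--     content in parentheses. It combines these expressions into a single expression
--     with the same prefix and concatenated content.
--
--     Args:
--         expression (str): A string containing comma-separated expressions to be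
--         combined.
--
--     Returns:
--         str: A single combined expression.
--
--     Examples:
--         ['In(a-)','In(b+)'] > 'In(a-b+)'
--         ['LW(a+)','LW(b-)'] > 'LW(a+b-)'
--         ['Tc(a+)','Tc(b-)','Tc(c-)'] > 'Tc(a+b-c-)'
--         ['Au(a-)', 'Lu(a-)', 'Au(b+)', 'Lu(b+)'] > 'Au(a-b+),Lu(a-b+)'
--
--     """
--
--     def extract_content(comp: str) -> str:
--         """
--         Extracts the content between parentheses from a component.
--
--         Args:
--             comp (str): A component string containing content in parentheses.
--
--         Returns:
--             str: The content between the parentheses.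
--         """
--         start: int = comp.index("(") + 1
--         end: int = comp.rindex(")")
--         return comp[start:end]
--
--     clustered = defaultdict(list)
--     for phenotype in components:
--         prefix_end: int = phenotype.index("(")
--         prefix: str = phenotype[:prefix_end]
--         clustered[prefix].append(phenotype)
--     pheno = []
--     for prefix, sub_components in clustered.items():
--         combined_content: str = "".join(
--             sorted(extract_content(comp) for comp in sub_components)
--         )
--         pheno.append(f"{prefix}({combined_content})")
--     return ",".join(pheno)
-- ===== SOURCE B (Python) =====
-- def _insert_sorted(lst: list[str], x: str) -> list[str]:
--     """Return lst (sorted) with x inserted after any equal elements."""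
--     for i, y in enumerate(lst):
--         if x < y:
--             return lst[:i] + [x] + lst[i:]
--     return lst + [x]
--
--
-- def combine_expressions(components: list[str]) -> str:
--     """One pass: parse each component once and keep each prefix's contents in a
--     sorted list by incremental insertion, instead of grouping first and sorting
--     each group afterwards."""
--     groups: dict[str, list[str]] = {}
--     for comp in components:
--         i = comp.index("(")
--         prefix = comp[:i]
--         content = comp[i + 1:comp.rindex(")")]
--         groups[prefix] = _insert_sorted(groups.get(prefix, []), content)
--     return ",".join(p + "(" + "".join(cs) + ")" for p, cs in groups.items())
-- ===== Notes on version B (the rewrite author's own statement) =====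
-- stated objective: alternative
-- what changed: B makes a single pass that parses each component once and maintains each prefix's contents as an incrementally sorted list, instead of A's group-components-into-a-defaultdict first and then sort each group's freshly extracted contents.
import Mathlib
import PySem

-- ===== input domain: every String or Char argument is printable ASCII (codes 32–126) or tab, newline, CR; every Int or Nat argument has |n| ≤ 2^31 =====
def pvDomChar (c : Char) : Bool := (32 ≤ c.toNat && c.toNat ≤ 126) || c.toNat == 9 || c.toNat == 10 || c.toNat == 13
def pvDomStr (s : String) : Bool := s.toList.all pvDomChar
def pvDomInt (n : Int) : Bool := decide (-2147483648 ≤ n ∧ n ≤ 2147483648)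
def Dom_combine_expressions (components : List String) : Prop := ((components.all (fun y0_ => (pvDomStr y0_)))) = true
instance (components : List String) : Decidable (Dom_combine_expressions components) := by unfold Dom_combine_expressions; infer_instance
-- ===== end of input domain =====

-- B replaces A's group-into-dict-then-sort-each-group by a single pass that parses each
-- component once and keeps each prefix's contents sorted by incremental insertion (objective: alternative).

-- ===== PORT A =====
-- extract_content(comp): comp[comp.index("(")+1 : comp.rindex(")")]
def pvExtract (comp : String) : String :=
  PySem.Str.slice comp (some (PySem.Str.find comp "(" + 1)) (some (PySem.Str.rfind comp ")"))

-- one iteration of A's grouping loop: clustered[phenotype[:phenotype.index("(")]].append(phenotype)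
def pvStepA (d : PySem.Dict String (List String)) (ph : String) : PySem.Dict String (List String) :=
  d.modify (PySem.Str.slice ph none (some (PySem.Str.find ph "("))) [] (fun l => l ++ [ph])

def combine_expressions (components : List String) : String :=
  let clustered := components.foldl pvStepA PySem.Dict.empty
  let pheno := clustered.items.map (fun pv =>
    PySem.Str.join "" [pv.1, "(",
      PySem.Str.join "" (PySem.List.sorted (pv.2.map pvExtract) (fun x => x) false), ")"])
  PySem.Str.join "," pheno

-- ===== PORT B =====
-- _insert_sorted(lst, x): scan for the first element greater than x, insert x there
def pvInsortS : List String → String → List String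
  | [], x => [x]
  | y :: ys, x => if x < y then x :: y :: ys else y :: pvInsortS ys x

-- one iteration of B's loop: parse comp once, insert the content into the prefix's sorted list
def pvStepB (d : PySem.Dict String (List String)) (comp : String) : PySem.Dict String (List String) :=
  let i := PySem.Str.find comp "("
  d.modify (PySem.Str.slice comp none (some i)) []
    (fun l => pvInsortS l (PySem.Str.slice comp (some (i + 1)) (some (PySem.Str.rfind comp ")"))))

def combine_expressions_alt (components : List String) : String :=
  let groups := components.foldl pvStepB PySem.Dict.empty
  PySem.Str.join "," (groups.items.map (fun pv =>
    PySem.Str.join "" [pv.1, "(", PySem.Str.join "" pv.2, ")"]))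

-- ===== PRECONDITION & SPEC =====
-- A raises ValueError (str.index / str.rindex) on any component missing "(" or ")"; exactly those are excluded.
def Pre_combine_expressions (components : List String) : Prop :=
  ∀ c ∈ components, PySem.Str.isIn "(" c = true ∧ PySem.Str.isIn ")" c = true
instance (components : List String) : Decidable (Pre_combine_expressions components) := by
  unfold Pre_combine_expressions; infer_instance

def pvWitness_combine_expressions : List String := ["Au(a-)", "Lu(a-)", "Au(b+)", "Lu(b+)"]

def Spec_combine_expressions (components : List String) (out : String) : Prop := out = combine_expressions_alt components
instance (components : List String) (out : String) : Decidable (Spec_combine_expressions components out) := by unfold Spec_combine_expressions; infer_instance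

-- ===== CLAIM (what is proved, stated in full; the proofs are below) =====
def Claim_equal_combine_expressions : Prop := ∀ (components : List String), Dom_combine_expressions components → Pre_combine_expressions components → Spec_combine_expressions components (combine_expressions components)

-- ===== LEMMAS AND PROOFS =====

-- B's insertion helper is PySem's insertBy with the < test
lemma pvInsortS_eq_insertBy (l : List String) (x : String) :
    pvInsortS l x = PySem.List.insertBy (fun a b => decide (a < b)) x l := by
  induction l with
  | nil => rfl
  | cons y ys ih =>
    simp only [pvInsortS, PySem.List.insertBy, ih]
    by_cases h : x < y <;> simp [h]

-- folding B's insertion over a list is Python's sorted (identity key)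
lemma foldl_pvInsortS_eq_sorted (l : List String) :
    l.foldl pvInsortS [] = PySem.List.sorted l (fun x => x) false := by
  rw [PySem.List.sorted_eq_foldl_insertBy]
  induction l with
  | nil => rfl
  | cons y ys ih =>
    simp only [List.foldl_cons]
    have h : ∀ (acc : List String) (t : List String),
        t.foldl pvInsortS acc =
        t.foldl (fun acc x => PySem.List.insertBy (fun a b => decide (a < b)) x acc) acc := by
      intro acc t
      induction t generalizing acc with
      | nil => rfl
      | cons z zs ihz => simp only [List.foldl_cons, pvInsortS_eq_insertBy, ihz]
    rw [h, pvInsortS_eq_insertBy]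

-- the value transformation relating A's groups to B's groups
def pvF (subs : List String) : List String := (subs.map pvExtract).foldl pvInsortS []

-- lookup through a key-preserving value map of the items list
lemma get?_map_items (l : List (String × List String)) (k : String) :
    (PySem.Dict.mk (l.map (fun p => (p.1, pvF p.2)))).get? k =
      ((PySem.Dict.mk l).get? k).map pvF := by
  induction l with
  | nil => rfl
  | cons p rest ih =>
    obtain ⟨a, b⟩ := p
    simp only [List.map_cons, PySem.Dict.get?_mk_cons]
    by_cases h : (a == k) = true
    · simp [h]
    · simp [h, ih]

lemma contains_map_items (l : List (String × List String)) (k : String) :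
    (PySem.Dict.mk (l.map (fun p => (p.1, pvF p.2)))).contains k = (PySem.Dict.mk l).contains k := by
  rw [PySem.Dict.contains_eq_isSome_get?, PySem.Dict.contains_eq_isSome_get?, get?_map_items]
  cases (PySem.Dict.mk l).get? k <;> rfl

lemma getD_map_items (l : List (String × List String)) (k : String) :
    (PySem.Dict.mk (l.map (fun p => (p.1, pvF p.2)))).getD k [] =
      pvF ((PySem.Dict.mk l).getD k []) := by
  rw [PySem.Dict.getD_eq_get?_getD, PySem.Dict.getD_eq_get?_getD, get?_map_items]
  cases (PySem.Dict.mk l).get? k <;> rfl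

lemma pvF_append (subs : List String) (ph : String) :
    pvF (subs ++ [ph]) = pvInsortS (pvF subs) (pvExtract ph) := by
  simp [pvF]

-- one loop iteration preserves the relation between A's and B's dictionaries
lemma step_rel (dA : PySem.Dict String (List String)) (ph : String) :
    (pvStepB (PySem.Dict.mk (dA.items.map (fun p => (p.1, pvF p.2)))) ph).items =
      (pvStepA dA ph).items.map (fun p => (p.1, pvF p.2)) := by
  have hkey : PySem.Str.slice ph (some (PySem.Str.find ph "(" + 1)) (some (PySem.Str.rfind ph ")")) = pvExtract ph := rfl
  set k := PySem.Str.slice ph none (some (PySem.Str.find ph "(")) with hk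
  simp only [pvStepB, pvStepA, PySem.Dict.modify, hkey]
  rw [getD_map_items]
  by_cases hc : dA.contains k = true
  · rw [PySem.Dict.items_insert_of_contains _ _ (by rw [contains_map_items]; exact hc),
        PySem.Dict.items_insert_of_contains _ _ hc, List.map_map, List.map_map]
    apply List.map_congr_left
    intro p hp
    show (if (p.1 == k) = true then (k, pvInsortS (pvF (dA.getD k [])) (pvExtract ph)) else (p.1, pvF p.2)) =
      (fun q => (q.1, pvF q.2)) (if (p.1 == k) = true then (k, dA.getD k [] ++ [ph]) else p)
    by_cases h1 : (p.1 == k) = true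
    · rw [if_pos h1, if_pos h1]
      show _ = (k, pvF (dA.getD k [] ++ [ph]))
      rw [pvF_append]
    · rw [if_neg h1, if_neg h1]
  · have hc' : dA.contains k = false := by simpa using hc
    rw [PySem.Dict.items_insert_of_not_contains _ _ (by rw [contains_map_items]; exact hc'),
        PySem.Dict.items_insert_of_not_contains _ _ hc']
    rw [PySem.Dict.getD_of_not_contains _ _ hc', List.map_append]
    rfl

-- the whole fold preserves it
lemma fold_rel (comps : List String) (dA : PySem.Dict String (List String)) :
    (comps.foldl pvStepB (PySem.Dict.mk (dA.items.map (fun p => (p.1, pvF p.2))))).items =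
      (comps.foldl pvStepA dA).items.map (fun p => (p.1, pvF p.2)) := by
  induction comps generalizing dA with
  | nil => rfl
  | cons c cs ih =>
    simp only [List.foldl_cons]
    have hstep := step_rel dA c
    calc (cs.foldl pvStepB (pvStepB (PySem.Dict.mk (dA.items.map (fun p => (p.1, pvF p.2)))) c)).items
        = (cs.foldl pvStepB (PySem.Dict.mk ((pvStepA dA c).items.map (fun p => (p.1, pvF p.2))))).items := by
          congr 2
          apply PySem.Dict.ext
          exact hstep
      _ = (cs.foldl pvStepA (pvStepA dA c)).items.map (fun p => (p.1, pvF p.2)) := ih _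

-- ===== VERDICT (by name: the statement is the Claim_ definition above) =====
theorem combine_expressions_spec : Claim_equal_combine_expressions := by
  intro components _ _
  unfold Spec_combine_expressions combine_expressions combine_expressions_alt
  have hrel : (components.foldl pvStepB PySem.Dict.empty).items =
      (components.foldl pvStepA PySem.Dict.empty).items.map (fun p => (p.1, pvF p.2)) :=
    fold_rel components PySem.Dict.empty
  simp only [hrel, List.map_map]
  congr 1
  apply List.map_congr_left
  intro p _
  simp [Function.comp, pvF, foldl_pvInsortS_eq_sorted]
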